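-- pv_equiv track=rewrite | github.com/ikutielmayer/Dell_Idrac | src/test_hw.py | parse_hwinventory_output
-- ===== SOURCE A (Python) =====
-- def parse_hwinventory_output(output):
--     inventory = {}
--     lines = output.splitlines()
--     current_section = None
--
--     for line in lines:
--         if line.startswith('FQDD ='):
--             current_section = line.split('FQDD =')[1].strip()
--             inventory[current_section] = {}
--         elif '=' in line and current_section is not None:
--             key, value = line.split('=', 1)
--             key, value = key.strip(), value.strip()
--             inventory[current_section][key] = value
--
--     return inventory
-- ===== SOURCE B (Python) =====
-- def _split_sections(lines):
--     """Phase 1: group lines into (header_line, body_lines) per FQDD header;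
--     lines before the first header are discarded."""
--     sections = []
--     i, n = 0, len(lines)
--     while i < n:
--         if lines[i].startswith('FQDD ='):
--             j = i + 1
--             while j < n and not lines[j].startswith('FQDD ='):
--                 j += 1
--             sections.append((lines[i], lines[i + 1:j]))
--             i = j
--         else:
--             i += 1
--     return sections
--
--
-- def _parse_body(body_lines):
--     pairs = {}
--     for l in body_lines:
--         if '=' in l:
--             k, v = l.split('=', 1)
--             pairs[k.strip()] = v.strip()
--     return pairs
--
--
-- def parse_hwinventory_output(output):
--     lines = output.splitlines()
--     # Phase 2: parse each section's body; dict() keeps the first position of a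
--     # duplicate FQDD name while its last section's contents win.
--     return dict((h.split('FQDD =')[1].strip(), _parse_body(b))
--                 for h, b in _split_sections(lines))
-- ===== Notes on version B (the rewrite author's own statement) =====
-- stated objective: alternative
-- what changed: Replaces A's single stateful loop (mutating a nested dict via a current-section variable) with a two-phase decomposition: first group the lines into (header, body-slice) sections, then parse each body independently and assemble the result with dict(), whose first-position/last-value semantics reproduces A's reset-then-fill behaviour on duplicate FQDD names.
import Mathlib
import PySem

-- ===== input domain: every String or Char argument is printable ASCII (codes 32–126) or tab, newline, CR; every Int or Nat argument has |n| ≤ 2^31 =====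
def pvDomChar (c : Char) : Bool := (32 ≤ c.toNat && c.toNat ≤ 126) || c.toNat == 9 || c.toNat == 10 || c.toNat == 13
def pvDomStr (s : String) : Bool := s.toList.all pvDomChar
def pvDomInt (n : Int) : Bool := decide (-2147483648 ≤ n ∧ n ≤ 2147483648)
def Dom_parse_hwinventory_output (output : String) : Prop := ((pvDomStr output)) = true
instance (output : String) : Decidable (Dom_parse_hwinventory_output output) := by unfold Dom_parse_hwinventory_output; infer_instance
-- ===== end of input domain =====

-- B replaces A's single stateful loop (current-section variable mutating a nested dict)
-- by a two-phase decomposition: group lines into (header, body) sections, parse each body,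
-- then assemble with dict(); same cost, objective 'alternative'.

-- ===== PORT A =====
-- line.split('FQDD =')[1].strip(): the [1] cannot raise, because both programs only use it
-- on lines that startswith 'FQDD =' (so the split has ≥ 2 parts); pyGetD "" is exact there.
def pvSecName (line : String) : String :=
  PySem.Str.strip (PySem.List.pyGetD ((PySem.Str.split? line "FQDD =").getD []) 1 "")

-- one iteration of A's for-loop; state = (inventory, current_section).
-- inventory[current_section][key] = value is ported as modify with default {}: exact, because
-- current_section is only ever a key A itself just inserted.
def pvStepA (st : PySem.Dict String (PySem.Dict String String) × Option String) (line : String) :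
    PySem.Dict String (PySem.Dict String String) × Option String :=
  if PySem.Str.startswith line "FQDD =" then
    (st.1.insert (pvSecName line) PySem.Dict.empty, some (pvSecName line))
  else if PySem.Str.isIn "=" line then
    match st.2 with
    | some sec =>
        match (PySem.Str.splitMax? line "=" 1).getD [] with
        | k :: v :: _ =>
            (st.1.modify sec PySem.Dict.empty
              (fun d => d.insert (PySem.Str.strip k) (PySem.Str.strip v)), st.2)
        | _ => st   -- unreachable: '=' in line ⇒ split('=', 1) has exactly two parts
    | none => st
  else st

def parse_hwinventory_output (output : String) : List (String × List (String × String)) :=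
  (((PySem.Str.splitlines output).foldl pvStepA (PySem.Dict.empty, none)).1).items.map
    (fun p => (p.1, p.2.items))

-- ===== PORT B =====
def pvNonHeader (l : String) : Bool := !PySem.Str.startswith l "FQDD ="

-- _split_sections: the outer while-loop over the remaining lines becomes the obvious
-- structural recursion; the inner while-loop + slice lines[i+1:j] IS takeWhile/dropWhile
-- of the non-header predicate on the rest.
def pvSplitSections : List String → List (String × List String)
  | [] => []
  | l :: ls =>
    if PySem.Str.startswith l "FQDD =" then
      (l, ls.takeWhile pvNonHeader) :: pvSplitSections (ls.dropWhile pvNonHeader)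
    else pvSplitSections ls
termination_by ls => ls.length
decreasing_by
  · have := List.length_dropWhile_le pvNonHeader ls; simp; omega
  · simp

-- one iteration of _parse_body's for-loop
def pvBodyStep (d : PySem.Dict String String) (l : String) : PySem.Dict String String :=
  if PySem.Str.isIn "=" l then
    match (PySem.Str.splitMax? l "=" 1).getD [] with
    | k :: v :: _ => d.insert (PySem.Str.strip k) (PySem.Str.strip v)
    | _ => d   -- unreachable, as in port A
  else d

def pvParseBody (body : List String) : PySem.Dict String String :=
  body.foldl pvBodyStep PySem.Dict.empty

def parse_hwinventory_output_alt (output : String) : List (String × List (String × String)) :=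
  (PySem.Dict.ofList ((pvSplitSections (PySem.Str.splitlines output)).map
      (fun p => (pvSecName p.1, pvParseBody p.2)))).items.map
    (fun p => (p.1, p.2.items))

-- ===== PRECONDITION & SPEC =====
def Spec_parse_hwinventory_output (output : String) (out : List (String × List (String × String))) : Prop := out = parse_hwinventory_output_alt output
instance (output : String) (out : List (String × List (String × String))) : Decidable (Spec_parse_hwinventory_output output out) := by unfold Spec_parse_hwinventory_output; infer_instance

-- ===== CLAIM (what is proved, stated in full; the proofs are below) =====
def Claim_equal_parse_hwinventory_output : Prop := ∀ (output : String), Dom_parse_hwinventory_output output → Spec_parse_hwinventory_output output (parse_hwinventory_output output)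

-- ===== LEMMAS AND PROOFS =====

-- B's assembly loop (dict() over the section pairs), as a fold from an arbitrary start
def pvAssemble (inv : PySem.Dict String (PySem.Dict String String))
    (secs : List (String × List String)) : PySem.Dict String (PySem.Dict String String) :=
  secs.foldl (fun acc p => acc.insert (pvSecName p.1) (pvParseBody p.2)) inv

theorem pvSplitSections_cons_header {l : String} {ls : List String}
    (h : PySem.Str.startswith l "FQDD =" = true) :
    pvSplitSections (l :: ls) =
      (l, ls.takeWhile pvNonHeader) :: pvSplitSections (ls.dropWhile pvNonHeader) := by
  rw [pvSplitSections, if_pos h]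

theorem pvSplitSections_cons_nonheader {l : String} {ls : List String}
    (h : PySem.Str.startswith l "FQDD =" = false) :
    pvSplitSections (l :: ls) = pvSplitSections ls := by
  rw [pvSplitSections, if_neg (by simpa using h)]

theorem pvStepA_header (st : PySem.Dict String (PySem.Dict String String) × Option String)
    (l : String) (h : PySem.Str.startswith l "FQDD =" = true) :
    pvStepA st l = (st.1.insert (pvSecName l) PySem.Dict.empty, some (pvSecName l)) := by
  unfold pvStepA; rw [if_pos h]

theorem pvStepA_skip (inv : PySem.Dict String (PySem.Dict String String)) (l : String)
    (h : PySem.Str.startswith l "FQDD =" = false) :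
    pvStepA (inv, none) l = (inv, none) := by
  unfold pvStepA
  rw [if_neg (by simpa using h)]
  by_cases h2 : PySem.Str.isIn "=" l = true
  · rw [if_pos h2]
  · rw [if_neg h2]

-- modifying the key just inserted = inserting the modified value
theorem pv_modify_insert (d : PySem.Dict String (PySem.Dict String String)) (k : String)
    (v : PySem.Dict String String) (f : PySem.Dict String String → PySem.Dict String String) :
    (d.insert k v).modify k PySem.Dict.empty f = d.insert k (f v) := by
  simp [PySem.Dict.modify, PySem.Dict.getD_insert_self, PySem.Dict.insert_insert_self]

-- A's loop body, in the 'some sec' state on a non-header line, is B's body step at key sec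
theorem pv_stepA_some (inv : PySem.Dict String (PySem.Dict String String)) (sec : String)
    (d : PySem.Dict String String) (l : String)
    (h : PySem.Str.startswith l "FQDD =" = false) :
    pvStepA (inv.insert sec d, some sec) l = (inv.insert sec (pvBodyStep d l), some sec) := by
  unfold pvStepA pvBodyStep
  rw [if_neg (by simpa using h)]
  by_cases h2 : PySem.Str.isIn "=" l = true
  · rw [if_pos h2, if_pos h2]
    cases hm : (PySem.Str.splitMax? l "=" 1).getD [] with
    | nil => rfl
    | cons k rest =>
      cases rest with
      | nil => rfl
      | cons v rest' => simp [pv_modify_insert]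
  · rw [if_neg h2, if_neg h2]

-- invariant for A's loop while a current section is open
theorem pv_foldA_some (ls : List String) :
    ∀ (inv : PySem.Dict String (PySem.Dict String String)) (sec : String)
      (d : PySem.Dict String String),
    (ls.foldl pvStepA (inv.insert sec d, some sec)).1 =
      pvAssemble (inv.insert sec ((ls.takeWhile pvNonHeader).foldl pvBodyStep d))
        (pvSplitSections (ls.dropWhile pvNonHeader)) := by
  induction ls with
  | nil => intro inv sec d; simp [pvAssemble, pvSplitSections]
  | cons l ls ih =>
    intro inv sec d
    by_cases hl : PySem.Str.startswith l "FQDD =" = true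
    · have hnh : pvNonHeader l = false := by simpa [pvNonHeader] using hl
      simp only [List.foldl_cons, pvStepA_header _ _ hl, List.takeWhile_cons, List.dropWhile_cons,
        hnh, Bool.false_eq_true, if_false, List.foldl_nil]
      rw [ih, pvSplitSections_cons_header hl]
      simp [pvAssemble, pvParseBody]
    · have hl' : PySem.Str.startswith l "FQDD =" = false := by simpa using hl
      have hnh : pvNonHeader l = true := by simpa [pvNonHeader] using hl'
      simp only [List.foldl_cons, pv_stepA_some inv sec d l hl', List.takeWhile_cons,
        List.dropWhile_cons, hnh, if_true]
      rw [ih]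

-- before the first header A ignores every line, and B yields no section
theorem pv_foldA_none (ls : List String) :
    ∀ (inv : PySem.Dict String (PySem.Dict String String)),
    (ls.foldl pvStepA (inv, none)).1 = pvAssemble inv (pvSplitSections ls) := by
  induction ls with
  | nil => intro inv; simp [pvAssemble, pvSplitSections]
  | cons l ls ih =>
    intro inv
    by_cases hl : PySem.Str.startswith l "FQDD =" = true
    · simp only [List.foldl_cons, pvStepA_header _ _ hl]
      rw [pv_foldA_some, pvSplitSections_cons_header hl]
      simp [pvAssemble, pvParseBody]
    · have hl' : PySem.Str.startswith l "FQDD =" = false := by simpa using hl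
      simp only [List.foldl_cons, pvStepA_skip inv l hl', ih]
      rw [pvSplitSections_cons_nonheader hl']

-- B's dict(...) over the mapped sections IS pvAssemble from the empty dict
theorem pv_ofList_assemble (secs : List (String × List String)) :
    PySem.Dict.ofList (secs.map (fun p => (pvSecName p.1, pvParseBody p.2))) =
      pvAssemble PySem.Dict.empty secs := by
  simp [PySem.Dict.ofList, PySem.Dict.update, pvAssemble, List.foldl_map]

-- ===== VERDICT (by name: the statement is the Claim_ definition above) =====
theorem parse_hwinventory_output_spec : Claim_equal_parse_hwinventory_output := by
  intro output _
  unfold Spec_parse_hwinventory_output parse_hwinventory_output parse_hwinventory_output_alt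
  rw [pv_foldA_none, pv_ofList_assemble]
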